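-- pv_equiv track=rewrite | github.com/helena-ves/ot-harjoitustyo | src/tests/sudokuMatrix_test.py | helper_row_contains_same_numbers
-- ===== SOURCE A (Python) =====
-- def helper_row_contains_same_numbers(row):
--     sameNumbers = False
--     numbers = set([])
--     for number in row:
--         if number > 0:
--             if number in numbers:
--                 sameNumbers = True
--             if number not in numbers:
--                 numbers.add(number)
--     return sameNumbers
-- ===== SOURCE B (Python) =====
-- def helper_row_contains_same_numbers(row):
--     positives = [n for n in row if n > 0]
--     return len(positives) != len(set(positives))
-- ===== Notes on version B (the rewrite author's own statement) =====
-- stated objective: simpler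
-- what changed: B builds the list of positive entries once and decides duplication by comparing its length with the size of its set, replacing A's incremental flag-updating scan with per-element membership branches.
import Mathlib
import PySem

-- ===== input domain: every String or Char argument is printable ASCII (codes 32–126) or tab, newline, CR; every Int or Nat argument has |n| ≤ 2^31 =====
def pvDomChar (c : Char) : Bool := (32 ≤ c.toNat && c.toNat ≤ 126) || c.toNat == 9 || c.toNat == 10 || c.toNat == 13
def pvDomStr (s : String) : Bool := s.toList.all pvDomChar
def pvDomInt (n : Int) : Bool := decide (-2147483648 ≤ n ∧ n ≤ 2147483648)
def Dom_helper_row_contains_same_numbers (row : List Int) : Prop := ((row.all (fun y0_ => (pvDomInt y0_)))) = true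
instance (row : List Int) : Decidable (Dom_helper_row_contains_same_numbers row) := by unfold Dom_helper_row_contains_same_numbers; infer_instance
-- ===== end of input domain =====

-- B computes "row has a duplicate positive" by comparing the count of positive entries
-- with the size of their set, instead of A's incremental flag-and-set scan (objective: simpler).


-- ===== PORT A =====
-- loop body of A's for-loop: state = (sameNumbers, numbers)
def pvStepA (st : Bool × PySem.Set Int) (number : Int) : Bool × PySem.Set Int :=
  if number > 0 then
    let st1 := if PySem.Set.contains st.2 number then (true, st.2) else st
    if !(PySem.Set.contains st1.2 number) then (st1.1, PySem.Set.add st1.2 number) else st1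
  else st

def helper_row_contains_same_numbers (row : List Int) : Bool :=
  (row.foldl pvStepA (false, PySem.Set.empty)).1

-- ===== PORT B =====
def helper_row_contains_same_numbers_alt (row : List Int) : Bool :=
  let positives := row.filter (fun n => decide (n > 0))
  decide (positives.length ≠ PySem.Set.len (PySem.Set.ofList positives))

-- ===== PRECONDITION & SPEC =====
def Spec_helper_row_contains_same_numbers (row : List Int) (out : Bool) : Prop := out = helper_row_contains_same_numbers_alt row
instance (row : List Int) (out : Bool) : Decidable (Spec_helper_row_contains_same_numbers row out) := by unfold Spec_helper_row_contains_same_numbers; infer_instance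

-- ===== CLAIM (what is proved, stated in full; the proofs are below) =====
def Claim_equal_helper_row_contains_same_numbers : Prop := ∀ (row : List Int), Dom_helper_row_contains_same_numbers row → Spec_helper_row_contains_same_numbers row (helper_row_contains_same_numbers row)

-- ===== LEMMAS AND PROOFS =====

lemma pvStepA_eq (b : Bool) (s : PySem.Set Int) (n : Int) :
    pvStepA (b, s) n =
      if 0 < n then (b || decide (n ∈ s), PySem.Set.add s n) else (b, s) := by
  simp only [pvStepA, PySem.Set.contains, PySem.Set.add]
  by_cases h : n ∈ s <;> simp [h]

lemma pvAdd_len_le (s : List Int) (n : Int) :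
    (PySem.Set.add s n).length ≤ s.length + 1 := by
  simp only [PySem.Set.add]
  split <;> simp

lemma pvFoldAdd_len_le (l s : List Int) :
    (l.foldl PySem.Set.add s).length ≤ s.length + l.length := by
  induction l generalizing s with
  | nil => simp
  | cons a l ih =>
      simp only [List.foldl_cons, List.length_cons]
      calc (l.foldl PySem.Set.add (PySem.Set.add s a)).length
          ≤ (PySem.Set.add s a).length + l.length := ih _
        _ ≤ s.length + 1 + l.length := by
              have := pvAdd_len_le s a; omega
        _ = s.length + (l.length + 1) := by omega

lemma pvFoldAdd_len_iff (l : List Int) : ∀ (s : List Int), s.Nodup →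
    ((l.foldl PySem.Set.add s).length = s.length + l.length ↔ (s ++ l).Nodup) := by
  induction l with
  | nil => intro s hs; simpa using hs
  | cons a l ih =>
      intro s hs
      simp only [List.foldl_cons]
      by_cases h : a ∈ s
      · have hadd : PySem.Set.add s a = s := by
          simp [PySem.Set.add, PySem.Set.contains, h]
        rw [hadd]
        have hle := pvFoldAdd_len_le l s
        constructor
        · intro hlen
          exfalso
          simp only [List.length_cons] at hlen
          omega
        · intro hnd
          exact absurd h (by
            have := hnd
            simp only [List.nodup_append] at this
            exact fun hm => this.2.2 a hm a (by simp) rfl)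
      · have hadd : PySem.Set.add s a = s ++ [a] := by
          simp [PySem.Set.add, PySem.Set.contains, h]
        rw [hadd]
        have hnd' : (s ++ [a]).Nodup := by
          simp only [List.nodup_append]
          exact ⟨hs, by simp, fun x hx => by simp; rintro rfl; exact h hx⟩
        have := ih (s ++ [a]) hnd'
        rw [List.length_append] at this
        constructor
        · intro hlen
          simp only [List.length_cons] at hlen
          have hnodup : (s ++ [a] ++ l).Nodup := this.mp (by simp only [List.length_singleton]; omega)
          simpa [List.append_assoc] using hnodup
        · intro hnd
          have hnodup : (s ++ [a] ++ l).Nodup := by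
            simpa [List.append_assoc] using hnd
          have h2 := this.mpr hnodup
          simp only [List.length_singleton] at h2
          simp only [List.length_cons]
          omega

lemma pvOfList_len_iff (l : List Int) :
    (PySem.Set.ofList l).length = l.length ↔ l.Nodup := by
  have h := pvFoldAdd_len_iff l [] (by simp)
  simpa [PySem.Set.ofList_eq_foldl] using h

lemma pvLoopA_eq (xs : List Int) : ∀ (b : Bool) (s : List Int), s.Nodup →
    (xs.foldl pvStepA (b, s)).1
      = (b || decide (¬ (s ++ xs.filter (fun n => decide (n > 0))).Nodup)) := by
  induction xs with
  | nil => intro b s hs; simp [hs]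
  | cons n xs ih =>
      intro b s hs
      simp only [List.foldl_cons, pvStepA_eq]
      by_cases hn : 0 < n
      · by_cases hm : n ∈ s
        · have hadd : PySem.Set.add s n = s := by
            simp [PySem.Set.add, PySem.Set.contains, hm]
          rw [if_pos hn, hadd, ih _ s hs]
          have hnotnd : ¬ (s ++ List.filter (fun n => decide (n > 0)) (n :: xs)).Nodup := by
            simp only [List.filter_cons, decide_eq_true_eq]
            rw [if_pos (by simpa using hn)]
            simp only [List.nodup_append]
            intro h
            exact h.2.2 n hm n (by simp) rfl
          simp [hm, hnotnd]
        · have hadd : PySem.Set.add s n = s ++ [n] := by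
            simp [PySem.Set.add, PySem.Set.contains, hm]
          have hnd' : (s ++ [n]).Nodup := by
            simp only [List.nodup_append]
            exact ⟨hs, by simp, fun x hx => by simp; rintro rfl; exact hm hx⟩
          rw [if_pos hn, hadd, ih _ (s ++ [n]) hnd']
          simp only [List.filter_cons, decide_eq_true_eq]
          rw [if_pos (by simpa using hn)]
          simp [hm, List.append_assoc]
      · rw [if_neg hn, ih b s hs]
        simp only [List.filter_cons, decide_eq_true_eq]
        rw [if_neg (by simpa using hn)]

-- ===== VERDICT (by name: the statement is the Claim_ definition above) =====
theorem helper_row_contains_same_numbers_spec : Claim_equal_helper_row_contains_same_numbers := by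
  intro row _
  show helper_row_contains_same_numbers row = helper_row_contains_same_numbers_alt row
  unfold helper_row_contains_same_numbers helper_row_contains_same_numbers_alt
  rw [show (PySem.Set.empty : PySem.Set Int) = ([] : List Int) from rfl,
      pvLoopA_eq row false [] (by simp)]
  have hiff := pvOfList_len_iff (row.filter (fun n => decide (n > 0)))
  simp only [Bool.false_or, List.nil_append, PySem.Set.len]
  rcases Decidable.em ((row.filter (fun n => decide (n > 0))).Nodup) with h | h
  · simp [h, hiff.mpr h]
  · have : (PySem.Set.ofList (row.filter (fun n => decide (n > 0)))).length
        ≠ (row.filter (fun n => decide (n > 0))).length := fun hc => h (hiff.mp hc)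
    simp [h, Ne.symm this]
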